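-- pv_equiv track=rewrite | github.com/bbc/vc2_conformance | vc2_conformance/string_utils.py | ellipsise
-- ===== SOURCE A (Python) =====
-- def ellipsise(text, context=4, min_length=8):
--     """
--     Given a string which contains very long sequences of the same character
--     (e.g. long mostly constant binary or hex numbers), produce an 'ellipsised'
--     version with some of the repeated characters replaced with '...'.
--
--     Exactly one shortening operation will be carried out (on the longest run)
--     meaning that so long as the original string length is known, no ambiguity
--     is introduced in the ellipsised version.
--
--     For example::
--
--         >>> ellipsise("0b10100000000000000000000000000000000000001")
--         "0b1010000...00001"
--
--     Parameters
--     ==========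
--     text : str
--         String to ellipsise.
--     context : int
--         The number of repeated characters to retain before and after the
--         ellipses.
--     min_length : int
--         The minimum number of characters to bother replacing with '...'. This
--         means that no change will be made until 2*context + min_length
--         character repetitions.
--     """
--     # Special case to avoid handling it later
--     if len(text) == 0:
--         return text
--
--     repeats = []
--     num_repeats = 0
--     last_char = None
--     for char in text:
--         if char == last_char:
--             num_repeats += 1
--         else:
--             num_repeats = 1
--         repeats.append(num_repeats)
--         last_char = char
--
--     longest_run_end, longest_run_length = max(
--         enumerate(repeats),
--         key=lambda pos_count: pos_count[1],
--     )
--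
--     if longest_run_length < (2 * context) + min_length:
--         # Too short to bother
--         return text
--     else:
--         longest_run_start = longest_run_end - longest_run_length + 1
--         return "{}...{}".format(
--             text[: longest_run_start + context],
--             text[longest_run_end - context + 1 :],
--         )
-- ===== SOURCE B (Python) =====
-- def ellipsise(text, context=4, min_length=8):
--     if len(text) == 0:
--         return text
--     n = len(text)
--     best_len = 0
--     best_end = 0
--     i = 0
--     while i < n:
--         j = i + 1
--         while j < n and text[j] == text[i]:
--             j += 1
--         if best_len < j - i:
--             best_len = j - i
--             best_end = j - 1
--         i = j
--     if best_len < 2 * context + min_length: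
--         return text
--     start = best_end - best_len + 1
--     return text[: start + context] + "..." + text[best_end - context + 1:]
-- ===== Notes on version B (the rewrite author's own statement) =====
-- stated objective: alternative
-- what changed: Replaced A's per-character repeats list plus a max(enumerate(...)) pass with a single two-pointer scan over maximal runs that keeps the first longest run directly, building no intermediate list; same O(n) cost.
import Mathlib
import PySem

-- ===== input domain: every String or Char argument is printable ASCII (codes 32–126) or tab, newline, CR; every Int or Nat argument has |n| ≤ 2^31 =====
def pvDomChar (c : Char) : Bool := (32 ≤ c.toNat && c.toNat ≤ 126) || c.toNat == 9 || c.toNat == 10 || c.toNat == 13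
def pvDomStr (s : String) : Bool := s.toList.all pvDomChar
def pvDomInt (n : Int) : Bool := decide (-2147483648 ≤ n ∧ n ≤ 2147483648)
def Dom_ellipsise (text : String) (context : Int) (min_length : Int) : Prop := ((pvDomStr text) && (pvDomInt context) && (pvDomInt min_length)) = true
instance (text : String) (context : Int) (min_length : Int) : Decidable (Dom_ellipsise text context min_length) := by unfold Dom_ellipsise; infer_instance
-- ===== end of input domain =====

-- B replaces A's repeats list + max(enumerate(...)) pass with one two-pointer scan over
-- maximal runs that keeps the first longest run directly (alternative decomposition, same cost).

-- ===== PORT A =====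
def ellipsise (text : String) (context : Int) (min_length : Int) : String :=
  if text.toList.length = 0 then text
  else
    -- for char in text: build repeats, tracking (repeats, num_repeats, last_char)
    let st := text.toList.foldl
      (fun (st : List Int × Int × Option Char) (ch : Char) =>
        let num := if (some ch == st.2.2) then st.2.1 + 1 else 1
        (st.1 ++ [num], num, some ch))
      ([], 0, none)
    let repeats := st.1
    match PySem.List.max? (PySem.List.enumerate repeats 0) (fun p => p.2) with
    | none => text  -- unreachable guard: repeats is nonempty here (Python max would raise on empty)
    | some (longest_run_end, longest_run_length) =>
      if longest_run_length < 2 * context + min_length then text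
      else
        let longest_run_start := longest_run_end - longest_run_length + 1
        String.ofList (PySem.List.slice text.toList none (some (longest_run_start + context)))
          ++ "..."
          ++ String.ofList (PySem.List.slice text.toList (some (longest_run_end - context + 1)) none)

-- ===== PORT B =====
-- the outer while loop of Source B: i is the index of the current run's first char,
-- the inner while (advancing j) is the takeWhile/dropWhile split
def runScan (cs : List Char) (i bestLen bestEnd : Int) : Int × Int :=
  match cs with
  | [] => (bestLen, bestEnd)
  | c :: t =>
    let runLen : Int := 1 + (t.takeWhile (· == c)).length
    let rest := t.dropWhile (· == c)
    if bestLen < runLen then runScan rest (i + runLen) runLen (i + runLen - 1)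
    else runScan rest (i + runLen) bestLen bestEnd
termination_by cs.length
decreasing_by
  all_goals
    simpa using Nat.lt_succ_of_le (List.length_dropWhile_le (· == c) t)

def ellipsise_alt (text : String) (context : Int) (min_length : Int) : String :=
  let cs := text.toList
  if cs.length = 0 then text
  else
    let r := runScan cs 0 0 0
    let best_len := r.1
    let best_end := r.2
    if best_len < 2 * context + min_length then text
    else
      let start := best_end - best_len + 1
      String.ofList (PySem.List.slice cs none (some (start + context)))
        ++ "..."
        ++ String.ofList (PySem.List.slice cs (some (best_end - context + 1)) none)

-- ===== PRECONDITION & SPEC =====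
def Spec_ellipsise (text : String) (context : Int) (min_length : Int) (out : String) : Prop := out = ellipsise_alt text context min_length
instance (text : String) (context : Int) (min_length : Int) (out : String) : Decidable (Spec_ellipsise text context min_length out) := by unfold Spec_ellipsise; infer_instance

-- ===== CLAIM (what is proved, stated in full; the proofs are below) =====
def Claim_equal_ellipsise : Prop := ∀ (text : String) (context : Int) (min_length : Int), Dom_ellipsise text context min_length → Spec_ellipsise text context min_length (ellipsise text context min_length)

-- ===== LEMMAS AND PROOFS =====

-- A's repeats loop, recursively: value pushed for each char given last char and running count
def rep : List Char → Option Char → Int → List Int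
  | [], _, _ => []
  | c :: t, l, n =>
    let m := if (some c == l) then n + 1 else 1
    m :: rep t (some c) m

-- the fold inside PySem.List.max? with key (·.2), named
def maxStep (acc : Option (Int × Int)) (x : Int × Int) : Option (Int × Int) :=
  match acc with
  | none => some x
  | some m => if m.2 < x.2 then some x else some m

def onesFrom (n : Int) : Nat → List Int
  | 0 => []
  | k + 1 => (n + 1) :: onesFrom (n + 1) k

def ones (k : Nat) : List Int := onesFrom 0 k

theorem foldl_rep (cs : List Char) : ∀ (acc : List Int) (n : Int) (l : Option Char),
    (cs.foldl
      (fun (st : List Int × Int × Option Char) (ch : Char) =>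
        let num := if (some ch == st.2.2) then st.2.1 + 1 else 1
        (st.1 ++ [num], num, some ch))
      (acc, n, l)).1 = acc ++ rep cs l n := by
  induction cs with
  | nil => intro acc n l; simp [rep]
  | cons c t ih =>
    intro acc n l
    simp only [List.foldl_cons, rep]
    rw [ih]
    simp

theorem rep_run (t : List Char) : ∀ (c : Char) (n : Int),
    rep t (some c) n
      = onesFrom n (t.takeWhile (· == c)).length
        ++ rep (t.dropWhile (· == c)) (some c) (n + ((t.takeWhile (· == c)).length : Int)) := by
  induction t with
  | nil => intro c n; simp [onesFrom]
  | cons c' t2 ih =>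
    intro c n
    by_cases h : c' = c
    · subst h
      simp only [List.takeWhile_cons, List.dropWhile_cons, beq_self_eq_true, if_true, rep]
      rw [ih c' (n + 1)]
      simp only [List.length_cons, onesFrom, List.cons_append]
      have hcast : n + 1 + ((t2.takeWhile (· == c')).length : Int)
          = n + (((t2.takeWhile (· == c')).length + 1 : Nat) : Int) := by push_cast; omega
      rw [hcast]
    · have hb : (c' == c) = false := by simp [h]
      simp [hb, rep, h, onesFrom]

theorem rep_cons (c : Char) (t : List Char) (l : Option Char) (n : Int)
    (h : (some c == l) = false) :
    rep (c :: t) l n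
      = ones (1 + (t.takeWhile (· == c)).length)
        ++ rep (t.dropWhile (· == c)) (some c) (1 + ((t.takeWhile (· == c)).length : Int)) := by
  simp only [rep, h, Bool.false_eq_true, if_false]
  rw [rep_run t c 1]
  simp only [ones, Nat.add_comm 1, onesFrom]
  norm_num

theorem onesFrom_snoc (k : Nat) : ∀ (n : Int),
    onesFrom n (k + 1) = onesFrom n k ++ [n + (k : Int) + 1] := by
  induction k with
  | zero => intro n; simp [onesFrom]
  | succ k ih =>
    intro n
    show (n + 1) :: onesFrom (n + 1) (k + 1) = ((n + 1) :: onesFrom (n + 1) k) ++ _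
    rw [ih (n + 1)]
    simp only [List.cons_append, List.append_assoc]
    congr 3
    push_cast; omega

theorem length_onesFrom (k : Nat) : ∀ (n : Int), (onesFrom n k).length = k := by
  induction k with
  | zero => intro n; rfl
  | succ k ih => intro n; simp [onesFrom, ih]

theorem length_ones (k : Nat) : (ones k).length = k := length_onesFrom k 0

theorem fold_ones (k : Nat) : ∀ (i be bl : Int), 0 ≤ bl →
    List.foldl maxStep (some (be, bl)) (PySem.List.enumerate (ones k) i)
      = if bl < (k : Int) then some (i + (k : Int) - 1, (k : Int)) else some (be, bl) := by
  induction k with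
  | zero =>
    intro i be bl h
    simp [ones, onesFrom, PySem.List.enumerate]
    omega
  | succ k ih =>
    intro i be bl h
    have hones : ones (k + 1) = ones k ++ [(k : Int) + 1] := by
      show onesFrom 0 (k + 1) = onesFrom 0 k ++ _
      rw [onesFrom_snoc]
      norm_num
    rw [hones, PySem.List.enumerate_append, List.foldl_append, ih i be bl h]
    rw [length_ones]
    by_cases hb : bl < (k : Int)
    · simp only [hb, if_true]
      simp only [PySem.List.enumerate, List.foldl_cons, List.foldl_nil, maxStep]
      rw [if_pos (by omega), if_pos (by push_cast; omega)]
      simp only [Option.some.injEq, Prod.mk.injEq]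
      push_cast; omega
    · simp only [hb, if_false]
      simp only [PySem.List.enumerate, List.foldl_cons, List.foldl_nil, maxStep]
      by_cases hb2 : bl < (k : Int) + 1
      · rw [if_pos hb2, if_pos (by push_cast; omega)]
        simp only [Option.some.injEq, Prod.mk.injEq]
        push_cast; omega
      · rw [if_neg hb2, if_neg (by push_cast; omega)]

theorem head_dropWhile (t : List Char) (c : Char) :
    ∀ c' t2, t.dropWhile (· == c) = c' :: t2 → (c' == c) = false := by
  induction t with
  | nil => intro c' t2 h; simp at h
  | cons a t ih =>
    intro c' t2 h
    by_cases ha : a = c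
    · subst ha
      rw [List.dropWhile_cons_of_pos (by simp)] at h
      exact ih c' t2 h
    · rw [List.dropWhile_cons_of_neg (by simp [ha])] at h
      cases h
      simp [ha]

theorem main_scan (N : Nat) : ∀ (cs : List Char), cs.length ≤ N →
    ∀ (l : Option Char) (n i be bl : Int), 0 ≤ bl →
    (∀ c t, cs = c :: t → (some c == l) = false) →
    List.foldl maxStep (some (be, bl)) (PySem.List.enumerate (rep cs l n) i)
      = some ((runScan cs i bl be).2, (runScan cs i bl be).1) := by
  induction N with
  | zero =>
    intro cs hlen l n i be bl hbl _
    have : cs = [] := List.eq_nil_of_length_eq_zero (Nat.le_zero.mp hlen)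
    subst this
    simp [rep, PySem.List.enumerate, runScan]
  | succ N ih =>
    intro cs hlen l n i be bl hbl hmis
    cases cs with
    | nil => simp [rep, PySem.List.enumerate, runScan]
    | cons c t =>
      have hm : (some c == l) = false := hmis c t rfl
      rw [rep_cons c t l n hm, PySem.List.enumerate_append, List.foldl_append]
      rw [fold_ones (1 + (t.takeWhile (· == c)).length) i be bl hbl, length_ones]
      have hkcast : ((1 + (t.takeWhile (· == c)).length : Nat) : Int)
          = 1 + ((t.takeWhile (· == c)).length : Int) := by push_cast; omega
      rw [hkcast]
      have hrest : (t.dropWhile (· == c)).length ≤ N := by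
        have := List.length_dropWhile_le (· == c) t
        simp at hlen
        omega
      have hmis' : ∀ c' t2, t.dropWhile (· == c) = c' :: t2 → (some c' == some c) = false := by
        intro c' t2 h
        have := head_dropWhile t c c' t2 h
        simpa using this
      have hrs : runScan (c :: t) i bl be
          = if bl < 1 + ((t.takeWhile (· == c)).length : Int) then
              runScan (t.dropWhile (· == c)) (i + (1 + ((t.takeWhile (· == c)).length : Int)))
                (1 + ((t.takeWhile (· == c)).length : Int))
                (i + (1 + ((t.takeWhile (· == c)).length : Int)) - 1)
            else runScan (t.dropWhile (· == c)) (i + (1 + ((t.takeWhile (· == c)).length : Int))) bl be := by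
        rw [runScan]
      by_cases hb : bl < 1 + ((t.takeWhile (· == c)).length : Int)
      · simp only [hb, if_true] at hrs ⊢
        rw [hrs]
        exact ih (t.dropWhile (· == c)) hrest (some c) (1 + ((t.takeWhile (· == c)).length : Int))
          (i + (1 + ((t.takeWhile (· == c)).length : Int)))
          (i + (1 + ((t.takeWhile (· == c)).length : Int)) - 1)
          (1 + ((t.takeWhile (· == c)).length : Int)) (by positivity) hmis'
      · simp only [hb, if_false] at hrs ⊢
        rw [hrs]
        exact ih (t.dropWhile (· == c)) hrest (some c) (1 + ((t.takeWhile (· == c)).length : Int))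
          (i + (1 + ((t.takeWhile (· == c)).length : Int))) be bl hbl hmis'

theorem max?_eq_scan (cs : List Char) (hne : cs ≠ []) :
    PySem.List.max? (PySem.List.enumerate (rep cs none 0) 0) (fun p => p.2)
      = some ((runScan cs 0 0 0).2, (runScan cs 0 0 0).1) := by
  have hfold : ∀ xs : List (Int × Int),
      PySem.List.max? xs (fun p => p.2) = List.foldl maxStep none xs := by
    intro xs
    unfold PySem.List.max?
    apply List.foldl_ext
    intro a b _
    cases a <;> rfl
  cases cs with
  | nil => exact absurd rfl hne
  | cons c t =>
    rw [hfold]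
    have h1 : rep (c :: t) none 0 = 1 :: rep t (some c) 1 := by simp [rep]
    rw [h1]
    have h2 : List.foldl maxStep none (PySem.List.enumerate (1 :: rep t (some c) 1) 0)
        = List.foldl maxStep (some ((0:Int), (0:Int))) (PySem.List.enumerate (1 :: rep t (some c) 1) 0) := by
      simp [PySem.List.enumerate, maxStep]
    rw [h2, ← h1]
    exact main_scan (c :: t).length (c :: t) le_rfl none 0 0 0 0 le_rfl
      (by intro c' t' h; cases h; rfl)

-- ===== VERDICT (by name: the statement is the Claim_ definition above) =====
theorem ellipsise_spec : Claim_equal_ellipsise := by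
  intro text context min_length _
  unfold Spec_ellipsise ellipsise ellipsise_alt
  by_cases h : text.toList.length = 0
  · simp [h]
  · simp only [h, if_false]
    have hne : text.toList ≠ [] := by
      intro hc; exact h (by simp [hc])
    rw [foldl_rep text.toList [] 0 none]
    simp only [List.nil_append]
    rw [max?_eq_scan text.toList hne]
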